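-- pv_equiv track=rewrite | github.com/sudarshanvankudre/usaco | Broken Necklace/beads.py | is_uniform
-- ===== SOURCE A (Python) =====
-- def is_uniform(necklace):
--     """
--     >>> is_uniform('bbbbbb')
--     True
--     >>> is_uniform('bbbwwbw')
--     True
--     >>> is_uniform('bbbrbbb')
--     False
--     """
--     color = None
--     for b in necklace:
--         if not color and b != 'w':
--             color = b
--         elif b != color and b != 'w':
--             return False
--     return True
-- ===== SOURCE B (Python) =====
-- def is_uniform(necklace):
--     return len({b for b in necklace if b != 'w'}) <= 1
-- ===== Notes on version B (the rewrite author's own statement) =====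
-- stated objective: idiomatic
-- what changed: B builds the set of distinct non-white beads in one pass and checks its size is at most 1, instead of A's sentinel variable with branching and early return.
import Mathlib
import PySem

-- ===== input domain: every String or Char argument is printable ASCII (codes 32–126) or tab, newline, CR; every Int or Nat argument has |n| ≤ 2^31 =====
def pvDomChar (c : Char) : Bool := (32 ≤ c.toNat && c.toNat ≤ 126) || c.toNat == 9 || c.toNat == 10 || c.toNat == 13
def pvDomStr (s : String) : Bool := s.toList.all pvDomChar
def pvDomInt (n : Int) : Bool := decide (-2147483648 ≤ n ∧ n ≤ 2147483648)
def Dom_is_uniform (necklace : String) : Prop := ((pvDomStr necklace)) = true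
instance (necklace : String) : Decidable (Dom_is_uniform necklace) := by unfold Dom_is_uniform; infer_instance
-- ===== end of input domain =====

-- B replaces A's sentinel-with-early-return loop by building the set of distinct
-- non-white beads and checking its size ≤ 1 (objective: idiomatic; same cost).

-- ===== PORT A =====
-- A's for-loop with 'color' state and early 'return False', as structural recursion.
def isUniformLoop (color : Option Char) (l : List Char) : Bool :=
  match l with
  | [] => true
  | b :: rest =>
    match color with
    | none => if b ≠ 'w' then isUniformLoop (some b) rest else isUniformLoop none rest
    | some c => if b ≠ c ∧ b ≠ 'w' then false else isUniformLoop (some c) rest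

def is_uniform (necklace : String) : Bool :=
  isUniformLoop none necklace.toList

-- ===== PORT B =====
-- the set comprehension {b for b in necklace if b != 'w'}, then len(...) <= 1
def is_uniform_alt (necklace : String) : Bool :=
  let s : PySem.Set Char :=
    necklace.toList.foldl (fun s b => if b ≠ 'w' then PySem.Set.add s b else s) PySem.Set.empty
  decide (PySem.Set.len s ≤ 1)

-- ===== PRECONDITION & SPEC =====
def Spec_is_uniform (necklace : String) (out : Bool) : Prop := out = is_uniform_alt necklace
instance (necklace : String) (out : Bool) : Decidable (Spec_is_uniform necklace out) := by unfold Spec_is_uniform; infer_instance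

-- ===== CLAIM (what is proved, stated in full; the proofs are below) =====
def Claim_equal_is_uniform : Prop := ∀ (necklace : String), Dom_is_uniform necklace → Spec_is_uniform necklace (is_uniform necklace)

-- ===== LEMMAS AND PROOFS =====

def foldAdd (s : PySem.Set Char) (l : List Char) : PySem.Set Char :=
  l.foldl (fun s b => if b ≠ 'w' then PySem.Set.add s b else s) s

theorem length_add_ge (s : PySem.Set Char) (b : Char) :
    s.length ≤ (PySem.Set.add s b).length := by
  simp only [PySem.Set.add]
  split <;> simp

theorem length_foldAdd_ge (l : List Char) (s : PySem.Set Char) :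
    s.length ≤ (foldAdd s l).length := by
  induction l generalizing s with
  | nil => simp [foldAdd]
  | cons b rest ih =>
    simp only [foldAdd, List.foldl_cons]
    split
    · exact le_trans (length_add_ge s b) (ih _)
    · exact ih s

theorem loop_some (l : List Char) (c : Char) :
    isUniformLoop (some c) l = decide ((foldAdd [c] l).length ≤ 1) := by
  induction l with
  | nil => simp [isUniformLoop, foldAdd]
  | cons b rest ih =>
    by_cases hw : b = 'w'
    · subst hw
      simpa [isUniformLoop, foldAdd] using ih
    · by_cases hc : b = c
      · subst hc
        simpa [isUniformLoop, foldAdd, hw, PySem.Set.add, PySem.Set.contains] using ih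
      · have hlen : 2 ≤ (foldAdd (PySem.Set.add [c] b) rest).length := by
          have h2 : (PySem.Set.add [c] b).length = 2 := by
            simp [PySem.Set.add, PySem.Set.contains, hc]
          calc 2 = (PySem.Set.add [c] b).length := h2.symm
            _ ≤ _ := length_foldAdd_ge rest _
        have hadd : PySem.Set.add [c] b = [c, b] := by
          simp [PySem.Set.add, PySem.Set.contains, hc]
        rw [hadd] at hlen
        simp only [foldAdd, ne_eq, ite_not] at hlen
        simp [isUniformLoop, hw, hc, foldAdd]
        omega

theorem loop_none (l : List Char) :
    isUniformLoop none l = decide ((foldAdd PySem.Set.empty l).length ≤ 1) := by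
  induction l with
  | nil => simp [isUniformLoop, foldAdd, PySem.Set.empty]
  | cons b rest ih =>
    simp only [isUniformLoop, foldAdd, List.foldl_cons]
    by_cases hw : b = 'w'
    · subst hw
      simpa [foldAdd] using ih
    · have hadd : PySem.Set.add PySem.Set.empty b = [b] := by
        simp [PySem.Set.add, PySem.Set.empty, PySem.Set.contains]
      simp only [ne_eq, hw, not_false_eq_true, if_pos, hadd]
      exact loop_some rest b

-- ===== VERDICT (by name: the statement is the Claim_ definition above) =====
theorem is_uniform_spec : Claim_equal_is_uniform := by
  intro necklace _
  unfold Spec_is_uniform is_uniform is_uniform_alt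
  simpa [PySem.Set.len, foldAdd] using loop_none necklace.toList
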